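-- pv_equiv track=rewrite | github.com/jyc0011/backjoon | 프로그래머스/2/389480. 완전범죄/완전범죄.py | solution
-- ===== SOURCE A (Python) =====
-- def solution(info, n, m):
--     dp = [0] * m
--     total = 0
--     for a, b in info:
--         total += a
--         for j in range(m - 1, b - 1, -1):
--             dp[j] = max(dp[j], dp[j - b] + a)
--     save_ = max(dp)
--     answer = total - save_
--     if answer >= n:
--         return -1
--     else:
--         return answer
-- ===== SOURCE B (Python) =====
-- def solution(info, n, m):
--     total = sum(a for a, _ in info)
--     memo = {}
--
--     def best(i, cap):
--         # max total A-trace removable from info[i:] with remaining B-capacity cap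
--         if i == len(info):
--             return 0
--         key = (i, cap)
--         if key in memo:
--             return memo[key]
--         a, b = info[i]
--         res = best(i + 1, cap)
--         if b <= cap:
--             res = max(res, best(i + 1, cap - b) + a)
--         memo[key] = res
--         return res
--
--     answer = total - best(0, m - 1)
--     return -1 if answer >= n else answer
-- ===== Notes on version B (the rewrite author's own statement) =====
-- stated objective: alternative
-- what changed: Replaces the bottom-up in-place dp array over all capacities 0..m-1 by top-down memoized recursion on (item index, remaining capacity) started only from capacity m-1, with the total summed separately.
import Mathlib
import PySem

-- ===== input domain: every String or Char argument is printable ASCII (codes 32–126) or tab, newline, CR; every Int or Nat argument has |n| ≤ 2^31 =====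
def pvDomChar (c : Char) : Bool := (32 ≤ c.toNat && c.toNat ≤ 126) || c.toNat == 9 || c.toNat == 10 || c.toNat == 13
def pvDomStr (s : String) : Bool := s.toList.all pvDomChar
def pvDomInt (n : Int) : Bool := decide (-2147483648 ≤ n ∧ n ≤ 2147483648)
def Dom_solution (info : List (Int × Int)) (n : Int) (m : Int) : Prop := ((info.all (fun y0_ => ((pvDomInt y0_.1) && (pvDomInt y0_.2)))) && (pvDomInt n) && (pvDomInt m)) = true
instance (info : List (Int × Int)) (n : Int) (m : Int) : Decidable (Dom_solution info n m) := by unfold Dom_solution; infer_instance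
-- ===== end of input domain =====

-- B replaces A's bottom-up in-place dp array over all capacities by top-down memoized
-- recursion on (item index, remaining capacity) started from capacity m-1 (objective:
-- alternative decomposition, same asymptotic cost).

-- ===== PORT A =====
-- inner loop: for j in range(m-1, b-1, -1): dp[j] = max(dp[j], dp[j-b] + a)
-- (pyGetD/pySetD are the total forms; Pre_solution keeps every accessed index in range)
def aInner (m a b : Int) (dp : List Int) : List Int :=
  (PySem.List.pyRange (m - 1) (b - 1) (-1)).foldl
    (fun dp j =>
      PySem.List.pySetD dp j
        (max (PySem.List.pyGetD dp j 0) (PySem.List.pyGetD dp (j - b) 0 + a))) dp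

def solution (info : List (Int × Int)) (n : Int) (m : Int) : Int :=
  let dp0 : List Int := List.replicate m.toNat 0        -- [0] * m
  let st := info.foldl
    (fun (st : List Int × Int) ab => (aInner m ab.1 ab.2 st.1, st.2 + ab.1)) (dp0, 0)
  let save := (PySem.List.max? st.1 (fun x => x)).getD 0  -- max(dp); Pre_ excludes m ≤ 0 (ValueError)
  let answer := st.2 - save
  if answer ≥ n then -1 else answer

-- ===== PORT B =====
-- best(i, cap) with dict memo, transcribing Source B's recursion
-- rest is info[i:]; i is carried only for the memo key (i, cap), as in Source B
def bBest (rest : List (Int × Int)) (i : Nat) (cap : Int)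
    (memo : PySem.Dict (Int × Int) Int) : Int × PySem.Dict (Int × Int) Int :=
  match rest with
  | [] => (0, memo)
  | ab :: rest' =>
    match memo.get? ((i : Int), cap) with
    | some v => (v, memo)
    | none =>
      let r := bBest rest' (i + 1) cap memo
      let r2 := if ab.2 ≤ cap then
          let t := bBest rest' (i + 1) (cap - ab.2) r.2
          (max r.1 (t.1 + ab.1), t.2)
        else r
      (r2.1, r2.2.insert ((i : Int), cap) r2.1)

def solution_alt (info : List (Int × Int)) (n : Int) (m : Int) : Int :=
  let total := (info.map (fun p => p.1)).sum
  let answer := total - (bBest info 0 (m - 1) PySem.Dict.empty).1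
  if answer ≥ n then -1 else answer

-- ===== PRECONDITION & SPEC =====
-- A raises ValueError when m ≤ 0 (max of the empty dp) and IndexError when some item
-- has a negative b-cost (dp[j-b] reaches past the end); Pre_ excludes exactly those.
def Pre_solution (info : List (Int × Int)) (n : Int) (m : Int) : Prop :=
  1 ≤ m ∧ ∀ p ∈ info, 0 ≤ p.2
instance (info : List (Int × Int)) (n : Int) (m : Int) : Decidable (Pre_solution info n m) := by
  unfold Pre_solution; infer_instance

def pvWitness_solution : (List (Int × Int)) × Int × Int := ([(3, 2), (5, 1)], 5, 4)

def Spec_solution (info : List (Int × Int)) (n : Int) (m : Int) (out : Int) : Prop := out = solution_alt info n m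
instance (info : List (Int × Int)) (n : Int) (m : Int) (out : Int) : Decidable (Spec_solution info n m out) := by unfold Spec_solution; infer_instance

-- ===== CLAIM (what is proved, stated in full; the proofs are below) =====
def Claim_equal_solution : Prop := ∀ (info : List (Int × Int)) (n : Int) (m : Int), Dom_solution info n m → Pre_solution info n m → Spec_solution info n m (solution info n m)

-- ===== LEMMAS AND PROOFS =====

-- the common mathematical value: best removable A-trace from the items, head recursion
def bestSpec : List (Int × Int) → Int → Int
  | [], _ => 0
  | (a, b) :: rest, cap =>
    if b ≤ cap then max (bestSpec rest cap) (bestSpec rest (cap - b) + a)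
    else bestSpec rest cap

theorem bestSpec_snoc (L : List (Int × Int)) (x : Int × Int) (c : Int)
    (hx : 0 ≤ x.2) (hL : ∀ p ∈ L, 0 ≤ p.2) :
    bestSpec (L ++ [x]) c =
      if x.2 ≤ c then max (bestSpec L c) (bestSpec L (c - x.2) + x.1) else bestSpec L c := by
  obtain ⟨xa, xb⟩ := x
  induction L generalizing c with
  | nil => simp [bestSpec]
  | cons y L ih =>
    obtain ⟨a, b⟩ := y
    have hb0 : 0 ≤ b := hL (a, b) (by simp)
    have hL' : ∀ p ∈ L, 0 ≤ p.2 := fun p hp => hL p (by simp [hp])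
    simp only [List.cons_append, bestSpec, ih c hL', ih (c - b) hL']
    rw [show c - b - xb = c - xb - b by omega]
    split_ifs <;> omega

theorem bestSpec_reverse (L : List (Int × Int)) (hL : ∀ p ∈ L, 0 ≤ p.2) (c : Int) :
    bestSpec L.reverse c = bestSpec L c := by
  induction L generalizing c with
  | nil => rfl
  | cons x L ih =>
    have hx : 0 ≤ x.2 := hL x (by simp)
    have hL' : ∀ p ∈ L, 0 ≤ p.2 := fun p hp => hL p (by simp [hp])
    rw [List.reverse_cons,
      bestSpec_snoc _ _ _ hx (fun p hp => hL' p (by simpa using hp))]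
    obtain ⟨a, b⟩ := x
    simp only [bestSpec, ih hL']

theorem bestSpec_mono (L : List (Int × Int)) (hb : ∀ p ∈ L, 0 ≤ p.2)
    {c c' : Int} (h : c ≤ c') : bestSpec L c ≤ bestSpec L c' := by
  induction L generalizing c c' with
  | nil => simp [bestSpec]
  | cons x L ih =>
    obtain ⟨a, b⟩ := x
    have hb0 : 0 ≤ b := hb (a, b) (by simp)
    have hrest : ∀ p ∈ L, 0 ≤ p.2 := fun p hp => hb p (by simp [hp])
    simp only [bestSpec]
    split_ifs with h1 h2 h2
    · exact max_le_max (ih hrest h) (by have := ih hrest (by omega : c - b ≤ c' - b); omega)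
    · omega
    · exact le_max_of_le_left (ih hrest h)
    · exact ih hrest h

-- ---- B side: memo correctness ----
def GoodMemo (info : List (Int × Int)) (memo : PySem.Dict (Int × Int) Int) : Prop :=
  ∀ i c v, memo.get? (i, c) = some v → ∃ j : Nat, i = (j : Int) ∧ v = bestSpec (info.drop j) c

theorem bBest_correct (info : List (Int × Int)) (rest : List (Int × Int)) (i : Nat)
    (hrest : rest = info.drop i) (cap : Int)
    (memo : PySem.Dict (Int × Int) Int) (hg : GoodMemo info memo) :
    (bBest rest i cap memo).1 = bestSpec rest cap ∧
      GoodMemo info (bBest rest i cap memo).2 := by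
  induction rest generalizing i cap memo with
  | nil => exact ⟨rfl, hg⟩
  | cons ab rest' ih =>
    have hrest' : rest' = info.drop (i + 1) := by
      rw [← List.drop_drop, ← hrest]; simp
    have hdropi : info.drop i = ab :: rest' := hrest.symm
    cases hmg : memo.get? ((i : Int), cap) with
    | some v =>
      obtain ⟨j, hij, hv⟩ := hg _ _ _ hmg
      have hji : j = i := by exact_mod_cast hij.symm
      have hv' : v = bestSpec (ab :: rest') cap := by rw [hv, hji, hdropi]
      have h1 : (bBest (ab :: rest') i cap memo).1 = v := by simp [bBest, hmg]
      have h2 : (bBest (ab :: rest') i cap memo).2 = memo := by simp [bBest, hmg]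
      rw [h1, h2, hv']
      exact ⟨rfl, hg⟩
    | none =>
      obtain ⟨ih1, ihg1⟩ := ih (i + 1) hrest' cap memo hg
      by_cases hle : ab.2 ≤ cap
      · obtain ⟨ih2, ihg2⟩ :=
          ih (i + 1) hrest' (cap - ab.2) (bBest rest' (i + 1) cap memo).2 ihg1
        have hres : (bBest (ab :: rest') i cap memo).1 =
            max (bestSpec rest' cap) (bestSpec rest' (cap - ab.2) + ab.1) := by
          simp [bBest, hmg, hle, ih1, ih2]
        have hval : (bBest (ab :: rest') i cap memo).1 = bestSpec (ab :: rest') cap := by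
          rw [hres]; obtain ⟨a, b⟩ := ab; simp [bestSpec, hle]
        refine ⟨hval, ?_⟩
        have hmem : (bBest (ab :: rest') i cap memo).2 =
            ((bBest rest' (i + 1) (cap - ab.2) (bBest rest' (i + 1) cap memo).2).2).insert
              ((i : Int), cap) (bBest (ab :: rest') i cap memo).1 := by
          simp [bBest, hmg, hle]
        rw [hmem, hval]
        intro i' c' v' hget
        by_cases hk : (i', c') = ((i : Int), cap)
        · have hk1 : i' = (i : Int) := congrArg Prod.fst hk
          have hk2 : c' = cap := congrArg Prod.snd hk
          rw [hk, PySem.Dict.get?_insert_self] at hget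
          refine ⟨i, hk1, ?_⟩
          rw [hdropi, hk2]
          exact (Option.some_inj.mp hget).symm
        · rw [PySem.Dict.get?_insert_of_ne _ _ hk] at hget
          exact ihg2 _ _ _ hget
      · have hres : (bBest (ab :: rest') i cap memo).1 = bestSpec rest' cap := by
          simp [bBest, hmg, hle, ih1]
        have hval : (bBest (ab :: rest') i cap memo).1 = bestSpec (ab :: rest') cap := by
          rw [hres]; obtain ⟨a, b⟩ := ab; simp [bestSpec, hle]
        refine ⟨hval, ?_⟩
        have hmem : (bBest (ab :: rest') i cap memo).2 =
            ((bBest rest' (i + 1) cap memo).2).insert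
              ((i : Int), cap) (bBest (ab :: rest') i cap memo).1 := by
          simp [bBest, hmg, hle]
        rw [hmem, hval]
        intro i' c' v' hget
        by_cases hk : (i', c') = ((i : Int), cap)
        · have hk1 : i' = (i : Int) := congrArg Prod.fst hk
          have hk2 : c' = cap := congrArg Prod.snd hk
          rw [hk, PySem.Dict.get?_insert_self] at hget
          refine ⟨i, hk1, ?_⟩
          rw [hdropi, hk2]
          exact (Option.some_inj.mp hget).symm
        · rw [PySem.Dict.get?_insert_of_ne _ _ hk] at hget
          exact ihg1 _ _ _ hget

-- ---- A side: dp invariant ----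
theorem pvGetSet (dp : List Int) (hi v j : Int) (h0 : 0 ≤ hi)
    (hl : hi < (dp.length : Int)) (hj : 0 ≤ j) :
    PySem.List.pyGetD (PySem.List.pySetD dp hi v) j 0 =
      if j = hi then v else PySem.List.pyGetD dp j 0 := by
  rw [show hi = ((hi.toNat : Nat) : Int) from (Int.toNat_of_nonneg h0).symm,
      show j = ((j.toNat : Nat) : Int) from (Int.toNat_of_nonneg hj).symm,
      PySem.List.pyGetD_pySetD_natCast dp hi.toNat j.toNat _ _ (by omega)]
  split_ifs with h1 h2 h2 <;> first | rfl | omega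

-- the descending inner loop, from upper index hi down to b
theorem aInner_descend (a b : Int) (hb : 0 ≤ b) (f : Int → Int) :
    ∀ (k : Nat) (hi : Int) (dp : List Int), (hi - (b - 1)).toNat = k →
      hi < (dp.length : Int) →
      (∀ j : Int, 0 ≤ j → j ≤ hi → PySem.List.pyGetD dp j 0 = f j) →
      ((PySem.List.pyRange hi (b - 1) (-1)).foldl
        (fun dp j =>
          PySem.List.pySetD dp j
            (max (PySem.List.pyGetD dp j 0) (PySem.List.pyGetD dp (j - b) 0 + a))) dp).length
        = dp.length ∧
      (∀ j : Int, 0 ≤ j → j ≤ hi →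
        PySem.List.pyGetD ((PySem.List.pyRange hi (b - 1) (-1)).foldl
          (fun dp j =>
            PySem.List.pySetD dp j
              (max (PySem.List.pyGetD dp j 0) (PySem.List.pyGetD dp (j - b) 0 + a))) dp) j 0
          = if b ≤ j then max (f j) (f (j - b) + a) else f j) ∧
      (∀ j : Int, hi < j → 0 ≤ j →
        PySem.List.pyGetD ((PySem.List.pyRange hi (b - 1) (-1)).foldl
          (fun dp j =>
            PySem.List.pySetD dp j
              (max (PySem.List.pyGetD dp j 0) (PySem.List.pyGetD dp (j - b) 0 + a))) dp) j 0
          = PySem.List.pyGetD dp j 0) := by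
  intro k
  induction k with
  | zero =>
    intro hi dp hk hlen hdp
    have hle : hi ≤ b - 1 := by omega
    rw [PySem.List.pyRange_neg_one_eq_nil hle]
    simp only [List.foldl_nil]
    refine ⟨trivial, ?_, by simp⟩
    intro j hj0 hjhi
    rw [if_neg (by omega), hdp j hj0 hjhi]
  | succ k ih =>
    intro hi dp hk hlen hdp
    have hlt : b - 1 < hi := by omega
    have h0hi : 0 ≤ hi := by omega
    rw [PySem.List.pyRange_neg_one_cons hlt]
    simp only [List.foldl_cons]
    set v := max (PySem.List.pyGetD dp hi 0) (PySem.List.pyGetD dp (hi - b) 0 + a) with hv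
    set dp1 := PySem.List.pySetD dp hi v with hdp1
    have hlen1 : dp1.length = dp.length := PySem.List.length_pySetD dp hi v
    have hget1 : ∀ j : Int, 0 ≤ j →
        PySem.List.pyGetD dp1 j 0 = if j = hi then v else PySem.List.pyGetD dp j 0 :=
      fun j hj => pvGetSet dp hi v j h0hi hlen hj
    have hdp1' : ∀ j : Int, 0 ≤ j → j ≤ hi - 1 → PySem.List.pyGetD dp1 j 0 = f j := by
      intro j hj0 hj1
      rw [hget1 j hj0, if_neg (by omega)]
      exact hdp j hj0 (by omega)
    obtain ⟨l1, l2, l3⟩ := ih (hi - 1) dp1 (by omega) (by omega) hdp1'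
    refine ⟨by rw [l1, hlen1], ?_, ?_⟩
    · intro j hj0 hjhi
      by_cases hcase : j ≤ hi - 1
      · exact l2 j hj0 hcase
      · have hjeq : j = hi := by omega
        rw [hjeq, l3 hi (by omega) h0hi, hget1 hi h0hi, if_pos rfl, hv,
          hdp hi h0hi le_rfl, hdp (hi - b) (by omega) (by omega), if_pos (by omega)]
    · intro j hjhi hj0
      rw [l3 j (by omega) hj0, hget1 j hj0, if_neg (by omega)]

theorem aInner_spec (m a b : Int) (dp : List Int) (f : Int → Int)
    (hlen : dp.length = m.toNat) (hb : 0 ≤ b)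
    (hdp : ∀ j : Int, 0 ≤ j → j < m → PySem.List.pyGetD dp j 0 = f j) :
    (aInner m a b dp).length = m.toNat ∧
      ∀ j : Int, 0 ≤ j → j < m →
        PySem.List.pyGetD (aInner m a b dp) j 0 =
          if b ≤ j then max (f j) (f (j - b) + a) else f j := by
  obtain ⟨l1, l2, _⟩ := aInner_descend a b hb f (m - 1 - (b - 1)).toNat (m - 1) dp rfl
    (by omega) (fun j hj0 hj1 => hdp j hj0 (by omega))
  exact ⟨by rw [← hlen]; exact l1, fun j hj0 hj1 => l2 j hj0 (by omega)⟩

theorem outer_fold (m : Int) (L : List (Int × Int)) :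
    ∀ (R : List (Int × Int)) (dp : List Int) (t : Int),
      dp.length = m.toNat →
      (∀ p ∈ L, 0 ≤ p.2) →
      (∀ j : Int, 0 ≤ j → j < m → PySem.List.pyGetD dp j 0 = bestSpec R j) →
      (L.foldl (fun (st : List Int × Int) ab =>
          (aInner m ab.1 ab.2 st.1, st.2 + ab.1)) (dp, t)).1.length = m.toNat ∧
      (∀ j : Int, 0 ≤ j → j < m →
        PySem.List.pyGetD (L.foldl (fun (st : List Int × Int) ab =>
          (aInner m ab.1 ab.2 st.1, st.2 + ab.1)) (dp, t)).1 j 0 =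
            bestSpec (L.reverse ++ R) j) ∧
      (L.foldl (fun (st : List Int × Int) ab =>
          (aInner m ab.1 ab.2 st.1, st.2 + ab.1)) (dp, t)).2
        = t + (L.map (fun p => p.1)).sum := by
  induction L with
  | nil =>
    intro R dp t h1 _ h3
    exact ⟨h1, fun j a b => by simpa using h3 j a b, by simp⟩
  | cons ab L ihL =>
    intro R dp t h1 hball h3
    have hab2 : 0 ≤ ab.2 := hball ab (by simp)
    obtain ⟨g1, g2⟩ := aInner_spec m ab.1 ab.2 dp (bestSpec R) h1 hab2 h3
    have hstep : ∀ j : Int, 0 ≤ j → j < m →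
        PySem.List.pyGetD (aInner m ab.1 ab.2 dp) j 0 = bestSpec (ab :: R) j := by
      intro j hj0 hj1
      rw [g2 j hj0 hj1]
      obtain ⟨a, b⟩ := ab
      simp [bestSpec]
    simp only [List.foldl_cons]
    obtain ⟨k1, k2, k3⟩ := ihL (ab :: R) (aInner m ab.1 ab.2 dp) (t + ab.1) g1
      (fun p hp => hball p (by simp [hp])) hstep
    refine ⟨k1, ?_, by rw [k3]; simp; ring⟩
    intro j hj0 hj1
    rw [k2 j hj0 hj1]
    congr 1
    simp

theorem solution_eq (info : List (Int × Int)) (n m : Int)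
    (hm : 1 ≤ m) (hb : ∀ p ∈ info, 0 ≤ p.2) :
    solution info n m =
      (if (info.map (fun p => p.1)).sum - bestSpec info (m - 1) ≥ n then -1
       else (info.map (fun p => p.1)).sum - bestSpec info (m - 1)) := by
  have hinit : ∀ j : Int, 0 ≤ j → j < m →
      PySem.List.pyGetD (List.replicate m.toNat (0 : Int)) j 0 = bestSpec [] j := by
    intro j hj0 hj1
    rw [PySem.List.pyGetD_eq_getElem _ _ hj0 (by simp; omega)]
    simp [bestSpec]
  obtain ⟨k1, k2, k3⟩ := outer_fold m info [] (List.replicate m.toNat 0) 0 (by simp) hb hinit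
  set st := info.foldl (fun (st : List Int × Int) ab =>
    (aInner m ab.1 ab.2 st.1, st.2 + ab.1)) (List.replicate m.toNat 0, 0) with hst
  have k2' : ∀ j : Int, 0 ≤ j → j < m →
      PySem.List.pyGetD st.1 j 0 = bestSpec info j := by
    intro j hj0 hj1
    rw [k2 j hj0 hj1, List.append_nil, bestSpec_reverse info hb j]
  have hne : st.1 ≠ [] := by
    intro hnil
    rw [hnil] at k1
    simp at k1
    omega
  cases hmax : PySem.List.max? st.1 (fun x => x) with
  | none => exact absurd ((PySem.List.max?_eq_none_iff _ _).mp hmax) hne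
  | some v =>
    have hvmem := PySem.List.max?_mem hmax
    have hvmax := PySem.List.max?_isMax hmax
    have hv : v = bestSpec info (m - 1) := by
      obtain ⟨kidx, hkidx, hkv⟩ := List.mem_iff_getElem.mp hvmem
      have hkm : (kidx : Int) < m := by
        have : kidx < m.toNat := k1 ▸ hkidx
        omega
      have hvk : v = bestSpec info (kidx : Int) := by
        rw [← k2' (kidx : Int) (by omega) hkm, PySem.List.pyGetD_natCast,
          List.getD_eq_getElem?_getD, List.getElem?_eq_getElem hkidx]
        simp [hkv]
      have hle1 : v ≤ bestSpec info (m - 1) := by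
        rw [hvk]
        exact bestSpec_mono info hb (by omega)
      have hle2 : bestSpec info (m - 1) ≤ v := by
        have hgm : PySem.List.pyGetD st.1 (m - 1) 0 = bestSpec info (m - 1) :=
          k2' (m - 1) (by omega) (by omega)
        have hmem : bestSpec info (m - 1) ∈ st.1 := by
          rw [← hgm, PySem.List.pyGetD_eq_getElem _ _ (by omega) (by rw [k1]; omega)]
          exact List.getElem_mem _
        exact hvmax _ hmem
      exact le_antisymm hle1 hle2
    show (if st.2 - (PySem.List.max? st.1 (fun x => x)).getD 0 ≥ n then -1
        else st.2 - (PySem.List.max? st.1 (fun x => x)).getD 0) = _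
    rw [hmax, k3, hv]
    simp

-- ===== VERDICT (by name: the statement is the Claim_ definition above) =====
theorem solution_spec : Claim_equal_solution := by
  intro info n m _ hpre
  unfold Spec_solution solution_alt
  rw [solution_eq info n m hpre.1 hpre.2]
  have := bBest_correct info info 0 (by simp) (m - 1) PySem.Dict.empty (by intro i c v h; simp [PySem.Dict.empty, PySem.Dict.get?] at h)
  rw [this.1]
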